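-- pv_equiv track=rewrite | github.com/connnnor/pystrokes | pystrokes.py | getStrokeSvgs
-- ===== SOURCE A (Python) =====
-- svgPathTemplate = """
-- <path fill="{COLOR}" d="{DATA}"></path>
-- """
--
-- def getStrokeSvgs(strokeMap):
--   strokes = strokeMap["strokes"]
--   strokesSvg = []
--   for i in range(0, len(strokes)):
--     svgPaths = []
--     for j in range(0, i+1):
--       color = "red" if i == j else "black"
--       svgPaths.append(svgPathTemplate.format(COLOR=color,DATA=strokes[j]))
--     strokesSvg.append('\n'.join(svgPaths))
--   return strokesSvg[1:]
-- ===== SOURCE B (Python) =====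
-- svgPathTemplate = """
-- <path fill="{COLOR}" d="{DATA}"></path>
-- """
--
-- def getStrokeSvgs(strokeMap):
--   strokes = strokeMap["strokes"]
--   black = [svgPathTemplate.format(COLOR="black", DATA=s) for s in strokes]
--   red = [svgPathTemplate.format(COLOR="red", DATA=s) for s in strokes]
--   return ['\n'.join(black[:i] + [red[i]]) for i in range(1, len(strokes))]
-- ===== Notes on version B (the rewrite author's own statement) =====
-- stated objective: alternative
-- what changed: A re-formats every path template in a nested per-row loop; B formats each stroke once into parallel black/red tables and assembles each row as a slice of the black table plus the red entry.
import Mathlib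
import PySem

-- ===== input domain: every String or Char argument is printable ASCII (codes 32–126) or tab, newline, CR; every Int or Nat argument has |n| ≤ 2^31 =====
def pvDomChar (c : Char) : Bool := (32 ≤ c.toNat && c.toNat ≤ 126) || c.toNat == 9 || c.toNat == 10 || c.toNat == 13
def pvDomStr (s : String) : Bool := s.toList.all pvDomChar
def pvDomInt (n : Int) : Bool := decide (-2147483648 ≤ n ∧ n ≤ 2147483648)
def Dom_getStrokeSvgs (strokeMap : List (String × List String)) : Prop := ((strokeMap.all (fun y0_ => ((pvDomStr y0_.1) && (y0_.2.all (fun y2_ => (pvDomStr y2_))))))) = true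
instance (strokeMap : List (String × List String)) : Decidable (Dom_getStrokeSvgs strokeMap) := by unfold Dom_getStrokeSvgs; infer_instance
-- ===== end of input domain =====

-- B formats each stroke once into black/red tables and builds each row by slice+join;
-- A re-formats every path in a nested loop. Return values proved equal on Pre_ (key "strokes" present).

-- svgPathTemplate.format(COLOR=c, DATA=d): exact, the template is a literal with exactly these two placeholders
def svgPath (color data : String) : String :=
  "\n<path fill=\"" ++ color ++ "\" d=\"" ++ data ++ "\"></path>\n"

-- ===== PORT A =====
def getStrokeSvgs (strokeMap : List (String × List String)) : List String :=
  let strokes := (strokeMap.lookup "strokes").getD []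
  let strokesSvg :=
    (PySem.List.pyRange 0 strokes.length 1).foldl (fun acc i =>
      let svgPaths :=
        (PySem.List.pyRange 0 (i + 1) 1).foldl (fun ps j =>
          let color := if i == j then "red" else "black"
          ps ++ [svgPath color (PySem.List.pyGetD strokes j "")]) []
      acc ++ [PySem.Str.join "\n" svgPaths]) []
  PySem.List.slice strokesSvg (some 1) none

-- ===== PORT B =====
def getStrokeSvgs_alt (strokeMap : List (String × List String)) : List String :=
  let strokes := (strokeMap.lookup "strokes").getD []
  let black := strokes.map (fun s => svgPath "black" s)
  let red := strokes.map (fun s => svgPath "red" s)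
  (PySem.List.pyRange 1 strokes.length 1).map (fun i =>
    PySem.Str.join "\n" (PySem.List.slice black none (some i) ++ [PySem.List.pyGetD red i ""]))

-- ===== PRECONDITION & SPEC =====
-- Pre_ excludes exactly the inputs without a "strokes" key, where Python A raises KeyError.
def Pre_getStrokeSvgs (strokeMap : List (String × List String)) : Prop :=
  (strokeMap.lookup "strokes").isSome = true
instance (strokeMap : List (String × List String)) : Decidable (Pre_getStrokeSvgs strokeMap) := by unfold Pre_getStrokeSvgs; infer_instance

def pvWitness_getStrokeSvgs : (List (String × List String)) := [("strokes", ["a", "b"])]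

def Spec_getStrokeSvgs (strokeMap : List (String × List String)) (out : List String) : Prop := out = getStrokeSvgs_alt strokeMap
instance (strokeMap : List (String × List String)) (out : List String) : Decidable (Spec_getStrokeSvgs strokeMap out) := by unfold Spec_getStrokeSvgs; infer_instance

-- ===== CLAIM (what is proved, stated in full; the proofs are below) =====
def Claim_equal_getStrokeSvgs : Prop := ∀ (strokeMap : List (String × List String)), Dom_getStrokeSvgs strokeMap → Pre_getStrokeSvgs strokeMap → Spec_getStrokeSvgs strokeMap (getStrokeSvgs strokeMap)

-- ===== LEMMAS AND PROOFS =====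

-- append-accumulator fold is a map
theorem foldl_append_map {α β : Type} (f : α → β) :
    ∀ (l : List α) (init : List β),
      l.foldl (fun acc x => acc ++ [f x]) init = init ++ l.map f := by
  intro l
  induction l with
  | nil => simp
  | cons x xs ih => intro init; simp [List.foldl, ih]

-- indexing a prefix of range equals mapping over take
theorem range_map_getD {α β : Type} (f : α → β) (xs : List α) (d : α) :
    ∀ (t : Nat), t ≤ xs.length →
      (List.range t).map (fun k => f (xs.getD k d)) = (xs.take t).map f := by
  intro t
  induction t with
  | zero => simp
  | succ n ih =>
    intro h
    have hn : n < xs.length := by omega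
    rw [List.range_succ, List.map_append, ih (by omega)]
    simp [List.getD, List.getElem?_eq_getElem hn]
    rw [List.take_add_one]
    simp [hn]

theorem getStrokeSvgs_rows (strokeMap : List (String × List String)) :
    getStrokeSvgs strokeMap = getStrokeSvgs_alt strokeMap := by
  unfold getStrokeSvgs getStrokeSvgs_alt
  set strokes := (strokeMap.lookup "strokes").getD [] with hs
  clear_value strokes
  simp only [foldl_append_map]
  rw [PySem.List.slice_from_one]
  rcases Nat.eq_zero_or_pos strokes.length with h0 | hpos
  · simp [PySem.List.pyRange_one_eq_nil, h0]
  · rw [PySem.List.pyRange_one_cons (by exact_mod_cast hpos)]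
    simp only [List.map_cons, List.nil_append, List.tail_cons, Int.zero_add]
    apply List.map_congr_left
    intro i hi
    rw [PySem.List.mem_pyRange_one] at hi
    obtain ⟨hi1, hi2⟩ := hi
    -- inner fold for row i
    rw [PySem.List.pyRange_one_succ_right (by omega), List.map_append]
    congr 1
    congr 1
    · -- black prefix
      rw [PySem.List.slice_to _ (by omega)]
      have hcast : i = ((i.toNat : Nat) : Int) := by omega
      rw [hcast, PySem.List.pyRange_one]
      simp only [Int.sub_zero, Int.toNat_natCast, List.map_map]
      rw [← List.map_take]
      rw [← range_map_getD (fun s => svgPath "black" s) strokes "" i.toNat (by omega)]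
      apply List.map_congr_left
      intro k hk
      rw [List.mem_range] at hk
      have hne : ¬ (max i 0 = (k : Int)) := by omega
      simp [Function.comp, PySem.List.pyGetD_natCast, hne]
    · -- red entry
      have hlen : i < ((strokes.map (fun s => svgPath "red" s)).length : Int) := by
        simp; omega
      rw [PySem.List.pyGetD_eq_getElem _ _ (by omega) hlen]
      rw [List.map_singleton, PySem.List.pyGetD_eq_getElem _ _ (by omega) (by exact_mod_cast hi2)]
      simp

-- ===== VERDICT (by name: the statement is the Claim_ definition above) =====
theorem getStrokeSvgs_spec : Claim_equal_getStrokeSvgs := by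
  intro strokeMap _ _
  unfold Spec_getStrokeSvgs
  exact getStrokeSvgs_rows strokeMap
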